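-- pv_equiv track=rewrite | github.com/imjinshuo/RulER | scripts/RQ3/utils.py | Java_string_fragment
-- ===== SOURCE A (Python) =====
-- def Java_string_fragment(node_str):
--     contained_Ft = []
--     templates = ['%a', '%b', '%c', '%d', '%e', '%f', '%g', '%h', '%n', '%o', '%s', '%t', '%x', '%.']
--     for id, template in enumerate(templates):
--         if template in node_str:
--             contained_Ft.append(id+1)
--     if not contained_Ft:
--         contained_Ft.append(0)
--     return contained_Ft, 15
-- ===== SOURCE B (Python) =====
-- def Java_string_fragment(node_str):
--     idmap = {'a': 1, 'b': 2, 'c': 3, 'd': 4, 'e': 5, 'f': 6, 'g': 7,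
--              'h': 8, 'n': 9, 'o': 10, 's': 11, 't': 12, 'x': 13, '.': 14}
--     found = set()
--     for c1, c2 in zip(node_str, node_str[1:]):
--         if c1 == '%' and c2 in idmap:
--             found.add(idmap[c2])
--     return (sorted(found) if found else [0]), 15
-- ===== Notes on version B (the rewrite author's own statement) =====
-- stated objective: alternative
-- what changed: B replaces A's 14 independent substring searches over the whole string by a single left-to-right scan that looks at each adjacent character pair once, collects the ids of '%'-pairs into a set via a precomputed char-to-id dict, and sorts the ids at the end.
import Mathlib
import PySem

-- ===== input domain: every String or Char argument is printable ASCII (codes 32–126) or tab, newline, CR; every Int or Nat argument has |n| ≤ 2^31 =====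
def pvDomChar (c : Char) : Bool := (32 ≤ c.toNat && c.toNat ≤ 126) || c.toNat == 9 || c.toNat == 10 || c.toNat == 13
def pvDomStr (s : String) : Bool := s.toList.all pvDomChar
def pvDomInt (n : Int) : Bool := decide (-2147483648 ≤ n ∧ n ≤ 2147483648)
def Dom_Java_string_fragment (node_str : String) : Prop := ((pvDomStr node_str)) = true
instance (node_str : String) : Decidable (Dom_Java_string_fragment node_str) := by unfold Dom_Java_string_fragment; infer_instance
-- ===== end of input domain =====

-- B replaces A's 14 substring scans by one left-to-right scan that collects the ids of the
-- '%'-pairs it meets into a set and then sorts them (objective: alternative decomposition).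

-- ===== PORT A =====
def Java_string_fragment (node_str : String) : List Int × Int :=
  let templates : List String :=
    ["%a","%b","%c","%d","%e","%f","%g","%h","%n","%o","%s","%t","%x","%."]
  let contained_Ft : List Int :=
    (PySem.List.enumerate templates).foldl
      (fun acc p => if PySem.Str.isIn p.2 node_str then acc ++ [p.1 + 1] else acc) []
  let contained_Ft := if contained_Ft = [] then contained_Ft ++ [0] else contained_Ft
  (contained_Ft, 15)

-- ===== PORT B =====
-- the dict literal `idmap` of Source B (distinct keys, insertion order)
def jsfIdMap : PySem.Dict Char Int :=
  ⟨[('a',1),('b',2),('c',3),('d',4),('e',5),('f',6),('g',7),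
    ('h',8),('n',9),('o',10),('s',11),('t',12),('x',13),('.',14)]⟩

def Java_string_fragment_alt (node_str : String) : List Int × Int :=
  let cs := node_str.toList
  let found : PySem.Set Int :=
    (cs.zip (cs.drop 1)).foldl
      (fun s p =>
        if p.1 = '%' then
          match PySem.Dict.get? jsfIdMap p.2 with
          | some t => s.add t
          | none => s
        else s)
      (PySem.Set.ofList [])
  ((if found ≠ [] then PySem.List.sorted found (fun x => x) else [0]), 15)

-- ===== PRECONDITION & SPEC =====
def Spec_Java_string_fragment (node_str : String) (out : List Int × Int) : Prop := out = Java_string_fragment_alt node_str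
instance (node_str : String) (out : List Int × Int) : Decidable (Spec_Java_string_fragment node_str out) := by unfold Spec_Java_string_fragment; infer_instance

-- ===== CLAIM (what is proved, stated in full; the proofs are below) =====
def Claim_equal_Java_string_fragment : Prop := ∀ (node_str : String), Dom_Java_string_fragment node_str → Spec_Java_string_fragment node_str (Java_string_fragment node_str)

-- ===== LEMMAS AND PROOFS =====

-- the (id, second char) table both characterizations are phrased over
def jsfT : List (Int × Char) :=
  [(1,'a'),(2,'b'),(3,'c'),(4,'d'),(5,'e'),(6,'f'),(7,'g'),
   (8,'h'),(9,'n'),(10,'o'),(11,'s'),(12,'t'),(13,'x'),(14,'.')]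

def jsfAList (cs : List Char) : List Int :=
  (jsfT.filter (fun p => PySem.Chars.isIn ['%', p.2] cs)).map (fun p => p.1)

def jsfStep (s : PySem.Set Int) (p : Char × Char) : PySem.Set Int :=
  if p.1 = '%' then
    match PySem.Dict.get? jsfIdMap p.2 with
    | some t => s.add t
    | none => s
  else s

theorem jsf_get?_assoc {l : List (Char × Int)} (h : (l.map Prod.fst).Nodup) (c : Char) (x : Int) :
    PySem.Dict.get? ⟨l⟩ c = some x ↔ (c, x) ∈ l := by
  induction l with
  | nil => simp [PySem.Dict.get?]
  | cons a t ih =>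
    obtain ⟨k, v⟩ := a
    simp only [List.map_cons, List.nodup_cons] at h
    by_cases hc : k = c
    · subst hc
      have hk : k ∉ t.map Prod.fst := h.1
      simp only [PySem.Dict.get?, List.find?, beq_self_eq_true]
      simp only [Option.map_some, Option.some_inj, List.mem_cons, Prod.mk.injEq, true_and]
      constructor
      · rintro rfl; exact Or.inl rfl
      · rintro (rfl | hm)
        · rfl
        · exact absurd (List.mem_map_of_mem (f := Prod.fst) hm) hk
    · have hbc : (k == c) = false := by simp [hc]
      have step : PySem.Dict.get? (⟨(k, v) :: t⟩ : PySem.Dict Char Int) c = PySem.Dict.get? ⟨t⟩ c := by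
        simp [PySem.Dict.get?, List.find?, hbc]
      rw [step, ih h.2]
      simp only [List.mem_cons, Prod.mk.injEq]
      constructor
      · exact fun hm => Or.inr hm
      · rintro (⟨rfl, rfl⟩ | hm)
        · exact absurd rfl hc
        · exact hm

theorem jsf_get? (c : Char) (x : Int) :
    PySem.Dict.get? jsfIdMap c = some x ↔ (x, c) ∈ jsfT := by
  rw [show jsfIdMap = ⟨jsfIdMap.items⟩ from rfl, jsf_get?_assoc (by decide)]
  constructor
  · intro hm
    have h2 := List.mem_map_of_mem (f := Prod.swap) hm
    simpa [jsfIdMap, jsfT] using h2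
  · intro hm
    have h2 := List.mem_map_of_mem (f := Prod.swap) hm
    simpa [jsfIdMap, jsfT] using h2

theorem jsf_infix_pair (c : Char) (cs : List Char) :
    ['%', c] <:+: cs ↔ ('%', c) ∈ cs.zip (cs.drop 1) := by
  induction cs with
  | nil => simp
  | cons a t ih =>
    rw [List.infix_cons_iff]
    cases t with
    | nil => simp [List.cons_prefix_cons]
    | cons b u =>
      simp only [List.drop_succ_cons, List.drop_zero] at ih ⊢
      simp only [List.zip_cons_cons, List.mem_cons, List.cons_prefix_cons, ih,
        Prod.mk.injEq, List.nil_prefix, and_true]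

theorem jsf_mem_step (init : PySem.Set Int) (p : Char × Char) (x : Int) :
    x ∈ jsfStep init p ↔ x ∈ init ∨ (p.1 = '%' ∧ PySem.Dict.get? jsfIdMap p.2 = some x) := by
  unfold jsfStep
  by_cases hp : p.1 = '%'
  · cases hg : PySem.Dict.get? jsfIdMap p.2 with
    | none => simp [hp]
    | some v =>
      simp only [hp, if_true, PySem.Set.mem_add, Option.some_inj, true_and]
      constructor
      · rintro (h | rfl)
        · exact Or.inl h
        · exact Or.inr rfl
      · rintro (h | rfl)
        · exact Or.inl h
        · exact Or.inr rfl
  · simp [hp]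

theorem jsf_mem_fold (l : List (Char × Char)) (init : PySem.Set Int) (x : Int) :
    x ∈ l.foldl jsfStep init
      ↔ x ∈ init ∨ ∃ c, ('%', c) ∈ l ∧ PySem.Dict.get? jsfIdMap c = some x := by
  induction l generalizing init with
  | nil => simp
  | cons p t ih =>
    simp only [List.foldl_cons, ih, jsf_mem_step, List.mem_cons]
    constructor
    · rintro ((h | ⟨hp, hg⟩) | ⟨c, hc, hg⟩)
      · exact Or.inl h
      · exact Or.inr ⟨p.2, Or.inl (by rw [← hp]), hg⟩
      · exact Or.inr ⟨c, Or.inr hc, hg⟩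
    · rintro (h | ⟨c, (hc | hc), hg⟩)
      · exact Or.inl (Or.inl h)
      · exact Or.inl (Or.inr ⟨(congrArg Prod.fst hc).symm ▸ rfl, by rw [show p.2 = c from (congrArg Prod.snd hc).symm ▸ rfl]; exact hg⟩)
      · exact Or.inr ⟨c, hc, hg⟩

theorem jsf_nodup_fold (l : List (Char × Char)) (init : PySem.Set Int)
    (h : init.Nodup) : (l.foldl jsfStep init).Nodup := by
  induction l generalizing init with
  | nil => exact h
  | cons p t ih =>
    refine ih _ ?_
    unfold jsfStep
    by_cases hp : p.1 = '%'
    · cases hg : PySem.Dict.get? jsfIdMap p.2 with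
      | none => simpa [hp, hg] using h
      | some v => simpa [hp, hg] using PySem.Set.nodup_add init v h
    · simpa [hp] using h

theorem jsf_core_gen (l : List (Int × Char)) (s : String) (acc : List Int) :
    (l.map (fun p => (p.1 - 1, String.ofList ['%', p.2]))).foldl
      (fun acc p => if PySem.Str.isIn p.2 s then acc ++ [p.1 + 1] else acc) acc
    = acc ++ (l.filter (fun p => PySem.Chars.isIn ['%', p.2] s.toList)).map (fun p => p.1) := by
  induction l generalizing acc with
  | nil => simp
  | cons p t ih =>
    simp only [List.map_cons, List.foldl_cons, List.filter_cons]
    by_cases hc : PySem.Chars.isIn ['%', p.2] s.toList = true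
    · have hS : PySem.Str.isIn (String.ofList ['%', p.2]) s = true := by
        simpa using hc
      simp only [hS, if_true, hc, ih, List.map_cons]
      have : p.1 - 1 + 1 = p.1 := by ring
      simp [this]
    · have hS : PySem.Str.isIn (String.ofList ['%', p.2]) s = false := by
        simpa using eq_false_of_ne_true hc
      simp only [hS, Bool.false_eq_true, if_false, ih]
      simp [eq_false_of_ne_true hc]

theorem jsf_enumerate_eq :
    PySem.List.enumerate ["%a","%b","%c","%d","%e","%f","%g","%h","%n","%o","%s","%t","%x","%."]
      = jsfT.map (fun p => (p.1 - 1, String.ofList ['%', p.2])) := by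
  decide

theorem jsf_aList_pairwise (cs : List Char) : (jsfAList cs).Pairwise (· < ·) := by
  have hT : jsfT.Pairwise (fun p q => p.1 < q.1) := by decide
  have hF : (jsfT.filter (fun p => PySem.Chars.isIn ['%', p.2] cs)).Pairwise
      (fun p q => p.1 < q.1) := hT.sublist List.filter_sublist
  exact (List.pairwise_map).mpr hF

theorem jsf_main (s : String) : Java_string_fragment s = Java_string_fragment_alt s := by
  have h1 : Java_string_fragment s =
      (let cFt := (PySem.List.enumerate
          ["%a","%b","%c","%d","%e","%f","%g","%h","%n","%o","%s","%t","%x","%."]).foldl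
          (fun acc p => if PySem.Str.isIn p.2 s then acc ++ [p.1 + 1] else acc) [];
        (if cFt = [] then cFt ++ [0] else cFt, 15)) := rfl
  have hA : Java_string_fragment s =
      (if jsfAList s.toList = [] then jsfAList s.toList ++ [0] else jsfAList s.toList, 15) := by
    rw [h1, jsf_enumerate_eq, jsf_core_gen]
    simp [jsfAList]
  have hB : Java_string_fragment_alt s =
      (if (s.toList.zip (s.toList.drop 1)).foldl jsfStep (PySem.Set.ofList []) ≠ [] then
          PySem.List.sorted ((s.toList.zip (s.toList.drop 1)).foldl jsfStep (PySem.Set.ofList [])) (fun x => x)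
        else [0], 15) := rfl
  set fnd := (s.toList.zip (s.toList.drop 1)).foldl jsfStep (PySem.Set.ofList []) with hfnd
  have hmem : ∀ x : Int, x ∈ fnd ↔ x ∈ jsfAList s.toList := by
    intro x
    rw [hfnd, jsf_mem_fold]
    simp only [PySem.Set.mem_ofList, List.not_mem_nil, false_or]
    constructor
    · rintro ⟨c, hz, hg⟩
      have hxT : (x, c) ∈ jsfT := (jsf_get? c x).mp hg
      have hin : PySem.Chars.isIn ['%', c] s.toList = true :=
        (PySem.Chars.isIn_iff_infix _ _).mpr ((jsf_infix_pair c s.toList).mpr hz)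
      exact List.mem_map.mpr ⟨(x, c), List.mem_filter.mpr ⟨hxT, hin⟩, rfl⟩
    · intro hm
      obtain ⟨p, hpf, hpx⟩ := List.mem_map.mp hm
      obtain ⟨hpT, hpin⟩ := List.mem_filter.mp hpf
      refine ⟨p.2, ?_, ?_⟩
      · exact (jsf_infix_pair p.2 s.toList).mp ((PySem.Chars.isIn_iff_infix _ _).mp hpin)
      · exact (jsf_get? p.2 x).mpr (by rw [← hpx]; exact hpT)
  have hnodupF : fnd.Nodup := jsf_nodup_fold _ _ (PySem.Set.nodup_ofList [])
  have hpw := jsf_aList_pairwise s.toList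
  have hnodupA : (jsfAList s.toList).Nodup := hpw.imp (fun h => ne_of_lt h)
  have hperm : (jsfAList s.toList).Perm fnd :=
    (List.perm_ext_iff_of_nodup hnodupA hnodupF).mpr (fun a => (hmem a).symm)
  have hsorted : PySem.List.sorted fnd (fun x => x) = jsfAList s.toList :=
    PySem.List.sorted_eq_of_perm_of_pairwise_lt fnd (jsfAList s.toList) (fun x => x) hperm hpw
  have hnil : fnd = [] ↔ jsfAList s.toList = [] := by
    constructor <;> intro h <;>
      refine List.eq_nil_iff_forall_not_mem.mpr (fun a ha => ?_)
    · exact List.eq_nil_iff_forall_not_mem.mp h a ((hmem a).mpr ha)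
    · exact List.eq_nil_iff_forall_not_mem.mp h a ((hmem a).mp ha)
  rw [hA, hB]
  by_cases h0 : jsfAList s.toList = []
  · simp [h0, hnil.mpr h0]
  · have : fnd ≠ [] := fun hf => h0 (hnil.mp hf)
    simp [h0, this, hsorted]

-- ===== VERDICT (by name: the statement is the Claim_ definition above) =====
theorem Java_string_fragment_spec : Claim_equal_Java_string_fragment := by
  intro s _
  exact jsf_main s
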